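-- pv_equiv track=rewrite | github.com/willwangfr/youtube-music-mapper | backend/server.py | get_artist_genre
-- ===== SOURCE A (Python) =====
-- def get_artist_genre(artist_name, genre_map):
--     """Get genre for an artist, trying various name formats."""
--     # Direct match
--     if artist_name in genre_map:
--         return genre_map[artist_name]
--
--     # Case-insensitive match
--     lower_name = artist_name.lower()
--     for mapped_artist, genre in genre_map.items():
--         if mapped_artist.lower() == lower_name:
--             return genre
--
--     # Try without "The " prefix
--     if lower_name.startswith('the '):
--         check_name = artist_name[4:]
--         for mapped_artist, genre in genre_map.items():
--             if mapped_artist.lower() == check_name.lower():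
--                 return genre
--
--     return None
-- ===== SOURCE B (Python) =====
-- def get_artist_genre(artist_name, genre_map):
--     """Get genre for an artist, trying various name formats."""
--     # Single pass: rank each entry by match quality and keep the best-ranked
--     # first match (exact match returns immediately; dict keys are unique).
--     lower_name = artist_name.lower()
--     stripped = artist_name[4:].lower() if lower_name.startswith('the ') else None
--     best_rank, best_genre = 3, None
--     for k, v in genre_map.items():
--         if k == artist_name:
--             return v
--         lk = k.lower()
--         if lk == lower_name:
--             rank = 1
--         elif stripped is not None and lk == stripped:
--             rank = 2
--         else:
--             continue
--         if rank < best_rank: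
--             best_rank, best_genre = rank, v
--     return best_genre
-- ===== Notes on version B (the rewrite author's own statement) =====
-- stated objective: alternative
-- what changed: Replaces A's three staged lookups/scans (exact key, then a full case-insensitive scan, then a full 'The '-stripped scan) by a single pass over the dict that ranks each entry by match quality and keeps the best-ranked earliest match, returning immediately on an exact key.
import Mathlib
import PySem

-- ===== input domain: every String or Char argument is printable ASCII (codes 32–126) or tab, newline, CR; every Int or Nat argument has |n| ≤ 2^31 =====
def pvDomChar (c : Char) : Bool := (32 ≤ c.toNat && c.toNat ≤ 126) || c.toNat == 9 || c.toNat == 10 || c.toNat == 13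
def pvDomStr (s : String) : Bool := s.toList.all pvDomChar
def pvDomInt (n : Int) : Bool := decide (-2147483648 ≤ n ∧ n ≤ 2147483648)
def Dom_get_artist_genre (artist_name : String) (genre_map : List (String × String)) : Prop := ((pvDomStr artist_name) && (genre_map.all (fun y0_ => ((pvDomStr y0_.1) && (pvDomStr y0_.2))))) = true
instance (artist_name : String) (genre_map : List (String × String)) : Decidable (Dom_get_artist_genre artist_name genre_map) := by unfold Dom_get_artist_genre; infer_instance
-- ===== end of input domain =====

-- B replaces A's staged lookups (exact, then case-insensitive scan, then 'The '-stripped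
-- scan) with one pass ranking each entry by match quality; return values proved equal.

-- ===== PORT A =====
-- A's 'for mapped_artist, genre in genre_map.items(): if mapped_artist.lower() == target: return genre' loops
def pvScanLower : List (String × String) → String → Option String
  | [], _ => none
  | (k, v) :: rest, target =>
      if PySem.Str.lower k == target then some v else pvScanLower rest target

def get_artist_genre (artist_name : String) (genre_map : List (String × String)) : Option String :=
  let d := PySem.Dict.ofList genre_map
  match d.get? artist_name with          -- if artist_name in genre_map: return genre_map[artist_name]
  | some g => some g
  | none =>
    let lower_name := PySem.Str.lower artist_name
    match pvScanLower d.items lower_name with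
    | some g => some g
    | none =>
      if PySem.Str.startswith lower_name "the " then
        let check_name := PySem.Str.slice artist_name (some 4) none   -- artist_name[4:]
        pvScanLower d.items (PySem.Str.lower check_name)
      else none

-- ===== PORT B =====
-- B's single loop: exact key returns at once; otherwise rank 1 (case-insensitive) or
-- rank 2 ('the '-stripped); keep the best-ranked earliest match in (best_rank, best_genre).
def pvRankScan (a lw : String) (st : Option String) :
    List (String × String) → Nat × Option String → Option String
  | [], best => best.2
  | (k, v) :: rest, best =>
      if k == a then some v
      else
        let lk := PySem.Str.lower k
        let rank? : Option Nat :=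
          if lk == lw then some 1
          else match st with
               | some s => if lk == s then some 2 else none
               | none => none
        match rank? with
        | some r => if r < best.1 then pvRankScan a lw st rest (r, some v)
                    else pvRankScan a lw st rest best
        | none => pvRankScan a lw st rest best

def get_artist_genre_alt (artist_name : String) (genre_map : List (String × String)) : Option String :=
  let d := PySem.Dict.ofList genre_map
  let lower_name := PySem.Str.lower artist_name
  let stripped : Option String :=
    if PySem.Str.startswith lower_name "the "
    then some (PySem.Str.lower (PySem.Str.slice artist_name (some 4) none))
    else none
  pvRankScan artist_name lower_name stripped d.items (3, none)

-- ===== PRECONDITION & SPEC =====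
def Spec_get_artist_genre (artist_name : String) (genre_map : List (String × String)) (out : Option String) : Prop := out = get_artist_genre_alt artist_name genre_map
instance (artist_name : String) (genre_map : List (String × String)) (out : Option String) : Decidable (Spec_get_artist_genre artist_name genre_map out) := by unfold Spec_get_artist_genre; infer_instance

-- ===== CLAIM =====
def Claim_equal_get_artist_genre : Prop := ∀ (artist_name : String) (genre_map : List (String × String)), Dom_get_artist_genre artist_name genre_map → Spec_get_artist_genre artist_name genre_map (get_artist_genre artist_name genre_map)

-- ===== LEMMAS AND PROOFS =====

-- first-exact-match scan over an assoc list, used to describe both ports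
def pvExactScan : List (String × String) → String → Option String
  | [], _ => none
  | (k, v) :: rest, a => if k == a then some v else pvExactScan rest a

theorem get?_eq_exactScan (d : PySem.Dict String String) (a : String) :
    d.get? a = pvExactScan d.items a := by
  obtain ⟨l⟩ := d
  induction l with
  | nil => simp [pvExactScan, PySem.Dict.get?]
  | cons p rest ih =>
    obtain ⟨k, v⟩ := p
    rw [PySem.Dict.get?_mk_cons]
    simp [pvExactScan, ih]

-- the single-pass tournament from each reachable state equals A's staged scans
theorem rankScan_spec (a lw : String) (st : Option String) (l : List (String × String)) :
    (∀ g, pvRankScan a lw st l (1, some g) = (pvExactScan l a).or (some g)) ∧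
    (∀ g, pvRankScan a lw st l (2, some g) =
        (pvExactScan l a).or ((pvScanLower l lw).or (some g))) ∧
    pvRankScan a lw st l (3, none) =
        (pvExactScan l a).or ((pvScanLower l lw).or
          (match st with | some s => pvScanLower l s | none => none)) := by
  induction l with
  | nil => refine ⟨fun g => rfl, fun g => rfl, ?_⟩; cases st <;> rfl
  | cons p rest ih =>
    obtain ⟨k, v⟩ := p
    obtain ⟨ih1, ih2, ih3⟩ := ih
    by_cases hk : (k == a) = true
    · refine ⟨fun g => ?_, fun g => ?_, ?_⟩ <;>
        simp [pvRankScan, pvExactScan, hk]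
    · by_cases h1 : (PySem.Str.lower k == lw) = true
      · refine ⟨fun g => ?_, fun g => ?_, ?_⟩ <;>
          simp [pvRankScan, pvExactScan, pvScanLower, hk, h1, ih1]
      · match st with
        | none =>
          refine ⟨fun g => ?_, fun g => ?_, ?_⟩ <;>
            simp [pvRankScan, pvExactScan, pvScanLower, hk, h1, ih1, ih2, ih3]
        | some s =>
          by_cases h2 : (PySem.Str.lower k == s) = true
          · refine ⟨fun g => ?_, fun g => ?_, ?_⟩ <;>
              simp [pvRankScan, pvExactScan, pvScanLower, hk, h1, h2, ih1, ih2]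
          · refine ⟨fun g => ?_, fun g => ?_, ?_⟩ <;>
              simp [pvRankScan, pvExactScan, pvScanLower, hk, h1, h2, ih1, ih2, ih3]

-- ===== VERDICT =====
theorem get_artist_genre_spec : Claim_equal_get_artist_genre := by
  intro artist_name genre_map _
  unfold Spec_get_artist_genre get_artist_genre get_artist_genre_alt
  show (match (PySem.Dict.ofList genre_map).get? artist_name with
        | some g => some g
        | none =>
          match pvScanLower (PySem.Dict.ofList genre_map).items (PySem.Str.lower artist_name) with
          | some g => some g
          | none =>
            if PySem.Str.startswith (PySem.Str.lower artist_name) "the " = true then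
              pvScanLower (PySem.Dict.ofList genre_map).items
                (PySem.Str.lower (PySem.Str.slice artist_name (some 4) none))
            else none)
      = pvRankScan artist_name (PySem.Str.lower artist_name)
          (if PySem.Str.startswith (PySem.Str.lower artist_name) "the " = true then
             some (PySem.Str.lower (PySem.Str.slice artist_name (some 4) none)) else none)
          (PySem.Dict.ofList genre_map).items (3, none)
  rw [get?_eq_exactScan, (rankScan_spec artist_name (PySem.Str.lower artist_name) _ _).2.2]
  rcases he : pvExactScan (PySem.Dict.ofList genre_map).items artist_name with _ | g
  · rcases hs : pvScanLower (PySem.Dict.ofList genre_map).items (PySem.Str.lower artist_name) with _ | g'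
    · simp only [Option.none_or]
      cases h : PySem.Chars.startswith (PySem.Chars.lower artist_name.toList) ['t','h','e',' '] <;>
        simp [PySem.Str.startswith, h]
    · simp [Option.or]
  · simp [Option.or]
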